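-- pv_equiv track=rewrite | github.com/nk2739/Portfolio | NeilKumar_SocialNetworks_DataChallenge1/data_challenge_1_pt2.py | getTopNodes
-- ===== SOURCE A (Python) =====
-- def getTopNodes(sortedNodes):
--
-- 	topNodes = set()
-- 	seen = set()
-- 	count = 0
--
-- 	for node in sortedNodes:
--
-- 		if count < 250 and node[0] not in seen:
-- 			seen.add(node[0])
-- 			count += 1
-- 			topNodes.add(node[0])
--
-- 	return topNodes
-- ===== SOURCE B (Python) =====
-- def getTopNodes(sortedNodes):
--     # Backward pass: overwrite so each id ends mapped to its FIRST occurrence index.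
--     first_index = {}
--     for i, node in reversed(list(enumerate(sortedNodes))):
--         first_index[node[0]] = i
--     # Ids whose first occurrence ranks among the 250 smallest are the first 250 uniques.
--     top = sorted(first_index, key=first_index.get)[:250]
--     return set(top)
-- ===== Notes on version B (the rewrite author's own statement) =====
-- stated objective: alternative
-- what changed: Replaces A's single forward guarded scan with a seen-set and counter by a different algorithm: a backward overwrite pass builds a first-occurrence-index map, then the ids are sorted by that index and the 250 smallest are sliced off.
import Mathlib
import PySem

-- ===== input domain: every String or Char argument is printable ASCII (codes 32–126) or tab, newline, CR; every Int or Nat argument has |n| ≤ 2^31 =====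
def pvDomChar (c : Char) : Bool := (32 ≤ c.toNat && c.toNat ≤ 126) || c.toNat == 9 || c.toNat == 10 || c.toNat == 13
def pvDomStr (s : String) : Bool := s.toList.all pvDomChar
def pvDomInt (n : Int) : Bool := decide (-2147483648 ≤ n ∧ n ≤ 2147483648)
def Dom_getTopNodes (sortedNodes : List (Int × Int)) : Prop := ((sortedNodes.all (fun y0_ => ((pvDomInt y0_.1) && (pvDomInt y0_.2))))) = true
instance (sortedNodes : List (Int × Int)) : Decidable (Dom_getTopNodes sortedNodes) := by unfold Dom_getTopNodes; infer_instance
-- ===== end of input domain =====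

-- B replaces A's single forward guarded scan (seen-set + counter) by a backward overwrite
-- pass building a first-occurrence-index map, then sort-by-index and a [:250] slice; objective: alternative.

-- ===== PORT A =====
def getTopNodes (sortedNodes : List (Int × Int)) : List Int :=
  (sortedNodes.foldl
    (fun (st : PySem.Set Int × PySem.Set Int × Int) node =>
      if decide (st.2.2 < 250) && !(PySem.Set.contains st.2.1 node.1) then
        (PySem.Set.add st.1 node.1, PySem.Set.add st.2.1 node.1, st.2.2 + 1)
      else st)
    (PySem.Set.empty, PySem.Set.empty, 0)).1

-- ===== PORT B =====
-- sorted(first_index, key=first_index.get): every iterated key is present in the dict, so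
-- the Optional-returning .get is exactly getD _ 0 here (the default is never consulted).
def getTopNodes_alt (sortedNodes : List (Int × Int)) : List Int :=
  let first_index :=
    ((PySem.List.enumerate sortedNodes 0).reverse).foldl
      (fun (d : PySem.Dict Int Int) p => d.insert p.2.1 p.1) PySem.Dict.empty
  let top := PySem.List.slice
      (PySem.List.sorted first_index.keys (fun k => first_index.getD k 0) false)
      none (some 250)
  PySem.Set.ofList top

-- ===== PRECONDITION & SPEC =====
def Spec_getTopNodes (sortedNodes : List (Int × Int)) (out : List Int) : Prop := out = getTopNodes_alt sortedNodes
instance (sortedNodes : List (Int × Int)) (out : List Int) : Decidable (Spec_getTopNodes sortedNodes out) := by unfold Spec_getTopNodes; infer_instance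

-- ===== CLAIM (what is proved, stated in full; the proofs are below) =====
def Claim_equal_getTopNodes : Prop := ∀ (sortedNodes : List (Int × Int)), Dom_getTopNodes sortedNodes → Spec_getTopNodes sortedNodes (getTopNodes sortedNodes)

-- ===== LEMMAS AND PROOFS =====

-- once the seen set holds 250 or more elements, the 250-cap ignores any further update
lemma take250_update (s l : List Int) (h : 250 ≤ s.length) :
    (PySem.Set.update s l).take 250 = s.take 250 := by
  rw [PySem.Set.update_eq_append_filter]
  exact List.take_append_of_le_length h

-- loop invariant for A: from a nodup state s (= seen = topNodes) with count = |s| ≤ 250,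
-- A's fold ends in the 250-capped ordered union of s with the incoming firsts
lemma loop_inv (xs : List (Int × Int)) : ∀ (s : List Int), s.Nodup → s.length ≤ 250 →
    xs.foldl
      (fun (st : PySem.Set Int × PySem.Set Int × Int) node =>
        if decide (st.2.2 < 250) && !(PySem.Set.contains st.2.1 node.1) then
          (PySem.Set.add st.1 node.1, PySem.Set.add st.2.1 node.1, st.2.2 + 1)
        else st)
      (s, s, (s.length : Int)) =
    (((PySem.Set.update s (xs.map (fun node => node.1))).take 250),
     ((PySem.Set.update s (xs.map (fun node => node.1))).take 250),
     ((((PySem.Set.update s (xs.map (fun node => node.1))).take 250).length : Int))) := by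
  induction xs with
  | nil =>
    intro s hnd hle
    simp [PySem.Set.update, List.take_of_length_le hle]
  | cons p xs ih =>
    intro s hnd hle
    rw [List.foldl_cons, List.map_cons, PySem.Set.update_cons]
    by_cases hmem : p.1 ∈ s
    · rw [PySem.Set.add_of_mem hmem]
      have hc : PySem.Set.contains s p.1 = true := (PySem.Set.contains_iff s p.1).mpr hmem
      simp only [hc, Bool.not_true, Bool.and_false, Bool.false_eq_true, if_false]
      exact ih s hnd hle
    · have hc : PySem.Set.contains s p.1 = false := by
        cases h : PySem.Set.contains s p.1
        · rfl
        · exact absurd ((PySem.Set.contains_iff s p.1).mp h) hmem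
      rw [PySem.Set.add_of_not_mem hmem]
      by_cases hfull : s.length = 250
      · have hnlt : ¬ ((s.length : Int) < 250) := by omega
        simp only [hnlt, decide_false, Bool.false_and, Bool.false_eq_true, if_false]
        have h250 : 250 ≤ (s ++ [p.1]).length := by simp; omega
        rw [take250_update _ _ h250, List.take_append_of_le_length (le_of_eq hfull.symm)]
        have := ih s hnd hle
        rw [take250_update _ _ (le_of_eq hfull.symm)] at this
        exact this
      · have hlt : ((s.length : Int) < 250) := by omega
        simp only [hlt, decide_true, hc, Bool.not_false, Bool.and_true, if_true]
        have hnd' : (s ++ [p.1]).Nodup := by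
          rw [List.nodup_append]
          refine ⟨hnd, List.nodup_singleton _, ?_⟩
          intro a ha b hb
          rw [List.mem_singleton] at hb
          subst hb
          exact fun h => hmem (h ▸ ha)
        have hle' : (s ++ [p.1]).length ≤ 250 := by simp; omega
        have h := ih (s ++ [p.1]) hnd' hle'
        have hlen : ((s ++ [p.1]).length : Int) = (s.length : Int) + 1 := by simp
        rw [hlen] at h
        exact h

-- the backward insert pass maps each present id to its FIRST occurrence index (offset s)
lemma getD_first_index (xs : List (Int × Int)) : ∀ (s : Int) (d : PySem.Dict Int Int) (k : Int),
    k ∈ xs.map (fun node => node.1) →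
    ((PySem.List.enumerate xs s).reverse.foldl
        (fun (d : PySem.Dict Int Int) p => d.insert p.2.1 p.1) d).getD k 0
      = s + (((xs.map (fun node => node.1)).idxOf k : Nat) : Int) := by
  induction xs with
  | nil => intro s d k h; simp at h
  | cons x xs ih =>
    intro s d k hk
    rw [PySem.List.enumerate_cons, List.reverse_cons, List.foldl_append, List.foldl_cons,
        List.foldl_nil, PySem.Dict.getD_insert]
    by_cases hkx : k = x.1
    · subst hkx
      simp [List.idxOf_cons_self]
    · have hk' : k ∈ xs.map (fun node => node.1) := by
        simp only [List.map_cons, List.mem_cons] at hk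
        exact hk.resolve_left hkx
      rw [if_neg hkx, ih (s + 1) d k hk']
      have hidx : (x.1 :: xs.map (fun node => node.1)).idxOf k
          = (xs.map (fun node => node.1)).idxOf k + 1 :=
        List.idxOf_cons_ne _ (fun h => hkx h.symm)
      simp only [List.map_cons, hidx]
      push_cast
      ring

-- the keys of the backward pass are exactly the distinct ids (as a set)
lemma keys_first_index (xs : List (Int × Int)) :
    ((PySem.List.enumerate xs 0).reverse.foldl
        (fun (d : PySem.Dict Int Int) p => d.insert p.2.1 p.1) PySem.Dict.empty).keys
      = PySem.Set.ofList ((xs.map (fun node => node.1)).reverse) := by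
  have h := PySem.Dict.keys_foldl_insert_key (ν := Int)
      ((PySem.List.enumerate xs 0).reverse) (fun p => p.2.1) (fun _ p => p.1) PySem.Dict.empty
  beta_reduce at h
  rw [h]
  have : (PySem.List.enumerate xs 0).reverse.map (fun p => p.2.1)
      = (xs.map (fun node => node.1)).reverse := by
    rw [List.map_reverse]
    have : (PySem.List.enumerate xs 0).map (fun p => p.2.1)
        = ((PySem.List.enumerate xs 0).map (fun p => p.2)).map (fun node => node.1) := by
      rw [List.map_map]; rfl
    rw [this, PySem.List.map_snd_enumerate]
  rw [this]
  simp [PySem.Dict.keys_empty, PySem.Set.update_nil_left]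

-- first-seen dedup is strictly increasing in first-occurrence index
lemma ofList_pairwise_idxOf (l : List Int) :
    (PySem.Set.ofList l).Pairwise (fun a b => l.idxOf a < l.idxOf b) := by
  induction l with
  | nil => simp [PySem.Set.ofList_nil]
  | cons x l ih =>
    rw [PySem.Set.ofList_cons]
    constructor
    · intro b hb
      simp only [PySem.Set.discard, List.mem_filter, Bool.not_eq_eq_eq_not, Bool.not_true,
        beq_eq_false_iff_ne, ne_eq] at hb
      have hbl : b ∈ l := (PySem.Set.mem_ofList l b).mp hb.1
      rw [List.idxOf_cons_self, List.idxOf_cons_ne _ (fun h => hb.2 h.symm)]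
      omega
    · have hsub : (PySem.Set.discard (PySem.Set.ofList l) x).Sublist (PySem.Set.ofList l) := by
        simp only [PySem.Set.discard]
        exact List.filter_sublist
      refine (ih.sublist hsub).imp_of_mem ?_
      intro a b ha hb hlt
      simp only [PySem.Set.discard, List.mem_filter, Bool.not_eq_eq_eq_not, Bool.not_true,
        beq_eq_false_iff_ne, ne_eq] at ha hb
      rw [List.idxOf_cons_ne _ (fun h => ha.2 h.symm), List.idxOf_cons_ne _ (fun h => hb.2 h.symm)]
      omega

-- ===== VERDICT (by name: the statement is the Claim_ definition above) =====
theorem getTopNodes_spec : Claim_equal_getTopNodes := by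
  intro xs _
  unfold Spec_getTopNodes getTopNodes getTopNodes_alt
  -- A's value
  have hA := loop_inv xs [] List.nodup_nil (by simp)
  simp only [List.length_nil, Nat.cast_zero, PySem.Set.update_nil_left] at hA
  show (xs.foldl _ (PySem.Set.empty, PySem.Set.empty, 0)).1 = _
  rw [show ((PySem.Set.empty, PySem.Set.empty, (0:Int)) :
        PySem.Set Int × PySem.Set Int × Int) = ([], [], 0) from rfl, hA]
  -- B's value
  set ids := xs.map (fun node => node.1) with hids
  set d := ((PySem.List.enumerate xs 0).reverse.foldl
      (fun (d : PySem.Dict Int Int) p => d.insert p.2.1 p.1) PySem.Dict.empty) with hd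
  have hkeys : d.keys = PySem.Set.ofList ids.reverse := keys_first_index xs
  have hperm : (PySem.Set.ofList ids).Perm d.keys := by
    rw [hkeys]
    refine (List.perm_ext_iff_of_nodup (PySem.Set.nodup_ofList _) (PySem.Set.nodup_ofList _)).mpr ?_
    intro a
    rw [PySem.Set.mem_ofList, PySem.Set.mem_ofList, List.mem_reverse]
  have hpair : (PySem.Set.ofList ids).Pairwise (fun a b => d.getD a 0 < d.getD b 0) := by
    refine (ofList_pairwise_idxOf ids).imp_of_mem ?_
    intro a b ha hb hlt
    have ha' : a ∈ ids := (PySem.Set.mem_ofList ids a).mp ha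
    have hb' : b ∈ ids := (PySem.Set.mem_ofList ids b).mp hb
    rw [hd, getD_first_index xs 0 _ a ha', getD_first_index xs 0 _ b hb', ← hids]
    omega
  have hsorted : PySem.List.sorted d.keys (fun k => d.getD k 0) false = PySem.Set.ofList ids :=
    PySem.List.sorted_eq_of_perm_of_pairwise_lt _ _ _ hperm hpair
  show _ = PySem.Set.ofList (PySem.List.slice
      (PySem.List.sorted d.keys (fun k => d.getD k 0) false) none (some 250))
  rw [hsorted, PySem.List.slice_to _ (by norm_num)]
  rw [PySem.Set.ofList_eq_self_of_nodup _
    ((List.take_sublist _ _).nodup (PySem.Set.nodup_ofList _))]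
  rfl
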